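-- pv_equiv track=rewrite | github.com/xxarupakaxx/coder | python/day3/day3/junkan.py | solve
-- ===== SOURCE A (Python) =====
-- def solve(n):
--     turtle = 1
--     rabit = 1
--     start = 0
--     end = 0
--
--     if n > 0:
--         while True:
--             turtle = (turtle * 10) % n
--             rabit=(rabit*10)%n
--             rabit = (rabit * 10) % n
--             if turtle == rabit :break
--
--         if rabit != 0:
--             rabit = 1
--             start = 1
--             while turtle != rabit:
--                 start = start + 1
--                 turtle = (turtle * 10) % n
--                 rabit = (rabit * 10) % n
--             rabit = (rabit * 10) % n
--             end =start
--             while turtle != rabit: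
--                 end = end + 1
--                 rabit = (rabit * 10) % n
--
--     return start, end
-- ===== SOURCE B (Python) =====
-- def solve(n):
--     # single forward pass hashing remainders instead of Floyd's cycle detection
--     if n <= 0:
--         return 0, 0
--     seen = {1: 0}
--     r = 1
--     i = 0
--     while True:
--         r = (r * 10) % n
--         i += 1
--         if r == 0:
--             return 0, 0
--         if r in seen:
--             return seen[r] + 1, i
--         seen[r] = i
-- ===== Notes on version B (the rewrite author's own statement) =====
-- stated objective: simpler
-- what changed: Replaces Floyd's three-phase tortoise-and-hare cycle detection with a single forward pass that stores each remainder's first index in a dict and returns (seen[r]+1, i) at the first repeated remainder, or (0,0) when the remainder hits 0.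
import Mathlib
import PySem

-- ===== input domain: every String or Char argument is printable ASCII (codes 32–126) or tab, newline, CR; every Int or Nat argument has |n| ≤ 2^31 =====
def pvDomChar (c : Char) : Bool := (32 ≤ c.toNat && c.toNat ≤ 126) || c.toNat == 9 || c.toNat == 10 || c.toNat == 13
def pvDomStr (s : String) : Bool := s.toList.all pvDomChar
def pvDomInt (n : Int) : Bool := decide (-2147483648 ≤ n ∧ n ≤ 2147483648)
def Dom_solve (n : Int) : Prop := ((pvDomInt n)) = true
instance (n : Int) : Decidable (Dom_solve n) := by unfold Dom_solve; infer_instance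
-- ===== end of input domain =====

-- B replaces Floyd's cycle detection by one forward pass hashing remainders (objective: simpler).

-- ===== PORT A =====
-- fuel is only a totality guard; the proofs show it never runs out

def solveFuelA (n : Int) : Nat := 2 * n.toNat + 2

-- first while loop: tortoise one step, hare two steps, break when equal
def solveLoop1 (n : Int) : Nat → Int → Int → Int × Int
  | 0, turtle, rabit => (turtle, rabit)
  | fuel + 1, turtle, rabit =>
    let turtle' := PySem.Int.mod (turtle * 10) n
    let rabit' := PySem.Int.mod (PySem.Int.mod (rabit * 10) n * 10) n
    if turtle' = rabit' then (turtle', rabit') else solveLoop1 n fuel turtle' rabit'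

-- second while loop: find the start of the cycle
def solveLoop2 (n : Int) : Nat → Int → Int → Int → Int × Int × Int
  | 0, start, turtle, rabit => (start, turtle, rabit)
  | fuel + 1, start, turtle, rabit =>
    if turtle ≠ rabit then
      solveLoop2 n fuel (start + 1) (PySem.Int.mod (turtle * 10) n) (PySem.Int.mod (rabit * 10) n)
    else (start, turtle, rabit)

-- third while loop: measure the cycle length
def solveLoop3 (n : Int) : Nat → Int → Int → Int → Int
  | 0, end_, _, _ => end_
  | fuel + 1, end_, turtle, rabit =>
    if turtle ≠ rabit then solveLoop3 n fuel (end_ + 1) turtle (PySem.Int.mod (rabit * 10) n)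
    else end_

def solve (n : Int) : Int × Int :=
  if n > 0 then
    let p := solveLoop1 n (solveFuelA n) 1 1
    if p.2 ≠ 0 then
      let q := solveLoop2 n (solveFuelA n) 1 p.1 1
      let rabit := PySem.Int.mod (q.2.2 * 10) n
      let end_ := solveLoop3 n (solveFuelA n) q.1 q.2.1 rabit
      (q.1, end_)
    else (0, 0)
  else (0, 0)

-- ===== PORT B =====
-- fuel is only a totality guard; the proofs show it never runs out

def solveAltLoop (n : Int) : Nat → PySem.Dict Int Int → Int → Int → Int × Int
  | 0, _, _, _ => (0, 0)
  | fuel + 1, seen, r, i =>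
    let r' := PySem.Int.mod (r * 10) n
    let i' := i + 1
    if r' = 0 then (0, 0)
    else
      match seen.get? r' with
      | some v => (v + 1, i')
      | none => solveAltLoop n fuel (seen.insert r' i') r' i'

def solve_alt (n : Int) : Int × Int :=
  if n ≤ 0 then (0, 0)
  else solveAltLoop n (n.toNat + 1) (PySem.Dict.ofList [(1, 0)]) 1 0

-- ===== PRECONDITION & SPEC =====
def Spec_solve (n : Int) (out : Int × Int) : Prop := out = solve_alt n
instance (n : Int) (out : Int × Int) : Decidable (Spec_solve n out) := by unfold Spec_solve; infer_instance

-- ===== CLAIM (what is proved, stated in full; the proofs are below) =====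
def Claim_equal_solve : Prop := ∀ (n : Int), Dom_solve n → Spec_solve n (solve n)

-- ===== LEMMAS AND PROOFS =====

-- the remainder sequence r k = 10^k mod n that both programs walk
def rseq (n : Int) : Nat → Int
  | 0 => 1
  | k + 1 => rseq n k * 10 % n

-- μ = pre-period length, lam = period length, with minimality facts
def Cyc (n : Int) (μ lam : Nat) : Prop :=
  0 < lam ∧ rseq n (μ + lam) = rseq n μ ∧
  (∀ i j, i < j → rseq n i = rseq n j → μ ≤ i) ∧
  (∀ t, 0 < t → t < lam → rseq n (μ + t) ≠ rseq n μ)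

lemma exists_least {P : Nat → Prop} (h : ∃ k, P k) : ∃ k, P k ∧ ∀ j < k, ¬ P j := by
  classical
  exact ⟨Nat.find h, Nat.find_spec h, fun j hj => Nat.find_min h hj⟩

lemma rseq_bounds (n : Int) (hn : 0 < n) (k : Nat) :
    0 ≤ rseq n (k + 1) ∧ rseq n (k + 1) < n :=
  ⟨Int.emod_nonneg _ (ne_of_gt hn), Int.emod_lt_of_pos _ hn⟩

lemma rseq_congr_add (n : Int) {a b : Nat} (h : rseq n a = rseq n b) (d : Nat) :
    rseq n (a + d) = rseq n (b + d) := by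
  induction d with
  | zero => simpa using h
  | succ d ih =>
    rw [show a + (d + 1) = (a + d) + 1 by omega, show b + (d + 1) = (b + d) + 1 by omega]
    simp only [rseq, ih]

lemma cyc_per (n : Int) {μ lam : Nat} (hc : Cyc n μ lam) (d m : Nat) :
    rseq n (μ + (d + m * lam)) = rseq n (μ + d) := by
  induction m with
  | zero => simp
  | succ m ih =>
    have h := rseq_congr_add n hc.2.1 (d + m * lam)
    rw [show μ + (d + (m + 1) * lam) = μ + lam + (d + m * lam) by ring] at *
    rw [h, ih]

lemma cyc_per' (n : Int) {μ lam : Nat} (hc : Cyc n μ lam) {i j : Nat}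
    (hμ : μ ≤ i) (hij : i ≤ j) (hdvd : lam ∣ (j - i)) : rseq n j = rseq n i := by
  obtain ⟨m, hm⟩ := hdvd
  rw [Nat.mul_comm] at hm
  have hj : j = μ + ((i - μ) + m * lam) := by omega
  have hi : i = μ + (i - μ) := by omega
  rw [hj, cyc_per n hc (i - μ) m, ← hi]

lemma cyc_dvd (n : Int) {μ lam : Nat} (hc : Cyc n μ lam) {i j : Nat}
    (hμ : μ ≤ i) (hij : i < j) (heq : rseq n i = rseq n j) : lam ∣ (j - i) := by
  obtain ⟨lampos, hper, hL3, hmin⟩ := hc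
  set d := i - μ with hd
  set e := j - i with he
  set s := e % lam with hs
  set q := e / lam with hq
  have hdm : lam * q + s = e := Nat.div_add_mod e lam
  have hslt : s < lam := Nat.mod_lt _ lampos
  have h1 : lam - 1 + 1 = lam := Nat.succ_pred_eq_of_pos lampos
  have h2 : d * (lam - 1) + d = d * lam := by
    conv_rhs => rw [← h1]
    ring
  have hx1 : i + d * (lam - 1) = μ + (0 + d * lam) := by omega
  have hx2 : j + d * (lam - 1) = μ + (s + (d + q) * lam) := by
    have h3 : d * lam + lam * q = (d + q) * lam := by ring
    omega
  have hkey := rseq_congr_add n heq (d * (lam - 1))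
  rw [hx1, hx2, cyc_per n ⟨lampos, hper, hL3, hmin⟩ 0 d,
      cyc_per n ⟨lampos, hper, hL3, hmin⟩ s (d + q)] at hkey
  simp only [Nat.add_zero] at hkey
  rcases Nat.eq_zero_or_pos s with h0 | hpos
  · exact ⟨q, by omega⟩
  · exact absurd hkey.symm (hmin s hpos hslt)

lemma exists_collision (n : Int) (hn : 0 < n) :
    ∃ i j : Nat, i < j ∧ j ≤ n.toNat + 1 ∧ rseq n i = rseq n j := by
  have hcard : (Finset.Ico (0 : ℤ) n).card < (Finset.range (n.toNat + 1)).card := by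
    simp [Int.card_Ico]
  obtain ⟨x, hx, y, hy, hxy, hfeq⟩ :=
    Finset.exists_ne_map_eq_of_card_lt_of_maps_to (f := fun k => rseq n (k + 1)) hcard
      (fun a _ => Finset.mem_Ico.mpr ⟨(rseq_bounds n hn a).1, (rseq_bounds n hn a).2⟩)
  simp only [Finset.mem_range] at hx hy
  rcases Nat.lt_or_ge x y with h | h
  · exact ⟨x + 1, y + 1, by omega, by omega, hfeq⟩
  · exact ⟨y + 1, x + 1, by omega, by omega, hfeq.symm⟩

lemma cyc_exists (n : Int) (hn : 0 < n) :
    ∃ μ lam, Cyc n μ lam ∧ μ + lam ≤ n.toNat + 1 := by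
  obtain ⟨i, j, hij, hjle, heq⟩ := exists_collision n hn
  obtain ⟨μ, ⟨j', hj', heq'⟩, μmin⟩ :=
    exists_least (P := fun a => ∃ b, a < b ∧ rseq n a = rseq n b) ⟨i, j, hij, heq⟩
  obtain ⟨lam, ⟨lampos, lameq⟩, lammin⟩ :=
    exists_least (P := fun t => 0 < t ∧ rseq n (μ + t) = rseq n μ)
      ⟨j' - μ, by omega, by rw [show μ + (j' - μ) = j' by omega]; exact heq'.symm⟩
  have hL3 : ∀ a b, a < b → rseq n a = rseq n b → μ ≤ a := by
    intro a b hab hab'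
    by_contra h
    exact μmin a (by omega) ⟨b, hab, hab'⟩
  have hmin : ∀ t, 0 < t → t < lam → rseq n (μ + t) ≠ rseq n μ := by
    intro t h1 h2 h3
    exact lammin t h2 ⟨h1, h3⟩
  have hc : Cyc n μ lam := ⟨lampos, lameq, hL3, hmin⟩
  refine ⟨μ, lam, hc, ?_⟩
  have hμi : μ ≤ i := hL3 i j hij heq
  have hdvd : lam ∣ (j - i) := cyc_dvd n hc hμi hij heq
  have hlam : lam ≤ j - i := Nat.le_of_dvd (by omega) hdvd
  omega

lemma rseq_zero_prop (n : Int) {z : Nat} (hz : rseq n z = 0) (t : Nat) :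
    rseq n (z + t) = 0 := by
  induction t with
  | zero => simpa using hz
  | succ t ih => rw [show z + (t + 1) = (z + t) + 1 by omega]; simp [rseq, ih]

-- zero at or after μ propagates back to μ
lemma rseq_zero_mu (n : Int) {μ lam : Nat} (hc : Cyc n μ lam) {k : Nat}
    (_hμk : μ ≤ k) (hk : rseq n k = 0) : rseq n μ = 0 := by
  have h1 : rseq n (μ + (0 + k * lam)) = rseq n (μ + 0) := cyc_per n hc 0 k
  have h2 : k ≤ k * lam := Nat.le_mul_of_pos_right k hc.1
  have h3 : rseq n (k + (μ + k * lam - k)) = 0 := rseq_zero_prop n hk _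
  rw [show k + (μ + k * lam - k) = μ + (0 + k * lam) by omega] at h3
  rw [h3] at h1
  simpa using h1.symm

-- no zero strictly before μ
lemma rseq_no_zero_before_mu (n : Int) {μ lam : Nat} (hc : Cyc n μ lam) {k : Nat}
    (hk : k < μ) : rseq n k ≠ 0 := by
  intro h0
  have h1 : rseq n (k + 1) = 0 := rseq_zero_prop n h0 1
  have := hc.2.2.1 k (k + 1) (by omega) (by rw [h0, h1])
  omega

lemma loop1_spec (n : Int) (hn : 0 < n) {K : Nat}
    (hKeq : rseq n K = rseq n (2 * K)) (_hKpos : 0 < K)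
    (hKmin : ∀ j, 0 < j → j < K → rseq n j ≠ rseq n (2 * j)) :
    ∀ fuel k, k < K → K ≤ k + fuel →
      solveLoop1 n fuel (rseq n k) (rseq n (2 * k)) = (rseq n K, rseq n (2 * K)) := by
  intro fuel
  induction fuel with
  | zero => intro k h1 h2; omega
  | succ fuel ih =>
    intro k h1 h2
    have hm : ∀ x : Int, PySem.Int.mod x n = x % n := fun x => PySem.Int.mod_eq_emod_of_pos hn
    have ht : PySem.Int.mod (rseq n k * 10) n = rseq n (k + 1) := by rw [hm]; rfl
    have hr : PySem.Int.mod (PySem.Int.mod (rseq n (2 * k) * 10) n * 10) n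
        = rseq n (2 * (k + 1)) := by
      rw [hm, hm, show 2 * (k + 1) = (2 * k + 1) + 1 by omega]
      rfl
    simp only [solveLoop1, ht, hr]
    by_cases heq : rseq n (k + 1) = rseq n (2 * (k + 1))
    · have hKk : K = k + 1 := by
        by_contra h
        exact hKmin (k + 1) (by omega) (by omega) heq
      rw [if_pos heq, hKk]
    · rw [if_neg heq]
      have hlt : k + 1 < K := by
        rcases Nat.lt_or_ge (k + 1) K with h | h
        · exact h
        · have hK : K = k + 1 := by omega
          rw [hK] at hKeq; exact absurd hKeq heq
      exact ih (k + 1) hlt (by omega)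

lemma loop2_spec (n : Int) (hn : 0 < n) {μ lam K : Nat} (hc : Cyc n μ lam)
    (hμK : μ ≤ K) (hdvd : lam ∣ K) (hKpos : 0 < K) :
    ∀ fuel j, j ≤ μ → μ ≤ j + fuel →
      solveLoop2 n fuel ((j : Int) + 1) (rseq n (K + j)) (rseq n j)
        = ((μ : Int) + 1, rseq n (K + μ), rseq n μ) := by
  intro fuel
  induction fuel with
  | zero =>
    intro j h1 h2
    have hj : j = μ := by omega
    rw [hj]; rfl
  | succ fuel ih =>
    intro j h1 h2
    have hm : ∀ x : Int, PySem.Int.mod x n = x % n := fun x => PySem.Int.mod_eq_emod_of_pos hn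
    rcases Nat.lt_or_ge j μ with hlt | hge
    · have hne : rseq n (K + j) ≠ rseq n j := by
        intro he
        have := hc.2.2.1 j (K + j) (by omega) he.symm
        omega
      simp only [solveLoop2, if_pos hne]
      have ht : PySem.Int.mod (rseq n (K + j) * 10) n = rseq n (K + (j + 1)) := by
        rw [hm, show K + (j + 1) = (K + j) + 1 by omega]; rfl
      have hr : PySem.Int.mod (rseq n j * 10) n = rseq n (j + 1) := by rw [hm]; rfl
      have hs : (j : Int) + 1 + 1 = ((j + 1 : Nat) : Int) + 1 := by push_cast; ring
      rw [ht, hr, hs]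
      exact ih (j + 1) (by omega) (by omega)
    · have hj : j = μ := by omega
      subst hj
      have heq : rseq n (K + j) = rseq n j :=
        cyc_per' n hc (le_refl j) (by omega) (by rw [show K + j - j = K by omega]; exact hdvd)
      simp only [solveLoop2, heq, ne_eq, not_true_eq_false, if_false]

lemma loop3_spec (n : Int) (hn : 0 < n) {μ lam : Nat} (hc : Cyc n μ lam) :
    ∀ fuel t, t + 1 ≤ lam → lam ≤ t + 1 + fuel →
      solveLoop3 n fuel ((μ : Int) + 1 + (t : Int)) (rseq n μ) (rseq n (μ + t + 1))
        = (μ : Int) + (lam : Int) := by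
  intro fuel
  induction fuel with
  | zero =>
    intro t h1 h2
    have ht : t + 1 = lam := by omega
    have heq : rseq n (μ + t + 1) = rseq n μ := by
      rw [show μ + t + 1 = μ + lam by omega]; exact hc.2.1
    simp only [solveLoop3]
    omega
  | succ fuel ih =>
    intro t h1 h2
    rcases Nat.lt_or_ge (t + 1) lam with hlt | hge
    · have hne : rseq n μ ≠ rseq n (μ + t + 1) := by
        intro he
        exact hc.2.2.2 (t + 1) (by omega) hlt (by rw [show μ + (t+1) = μ + t + 1 by omega]; exact he.symm)
      simp only [solveLoop3, if_pos hne]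
      have hm : PySem.Int.mod (rseq n (μ + t + 1) * 10) n = rseq n (μ + (t + 1) + 1) := by
        rw [PySem.Int.mod_eq_emod_of_pos hn, show μ + (t + 1) + 1 = (μ + t + 1) + 1 by omega]; rfl
      have hs : (μ : Int) + 1 + (t : Int) + 1 = (μ : Int) + 1 + ((t + 1 : Nat) : Int) := by
        push_cast; ring
      rw [hm, hs]
      exact ih (t + 1) (by omega) (by omega)
    · have ht : t + 1 = lam := by omega
      have heq : rseq n (μ + t + 1) = rseq n μ := by
        rw [show μ + t + 1 = μ + lam by omega]; exact hc.2.1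
      simp only [solveLoop3, heq, ne_eq, not_true_eq_false, if_false]
      omega

lemma loopB_nz (n : Int) (hn : 0 < n) {μ lam : Nat} (hc : Cyc n μ lam)
    (hnz : ∀ k, rseq n k ≠ 0) :
    ∀ fuel i (seen : PySem.Dict Int Int),
      i < μ + lam → μ + lam ≤ i + fuel →
      (∀ v j, seen.get? v = some j → ∃ jn : Nat, j = (jn : Int) ∧ jn ≤ i ∧ rseq n jn = v) →
      (∀ j : Nat, j ≤ i → seen.get? (rseq n j) = some (j : Int)) →
      solveAltLoop n fuel seen (rseq n i) (i : Int) = ((μ : Int) + 1, (μ : Int) + (lam : Int)) := by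
  intro fuel
  induction fuel with
  | zero => intro i seen h1 h2 _ _; omega
  | succ fuel ih =>
    intro i seen h1 h2 inv1 inv2
    have hm : PySem.Int.mod (rseq n i * 10) n = rseq n (i + 1) := by
      rw [PySem.Int.mod_eq_emod_of_pos hn]; rfl
    simp only [solveAltLoop, hm, if_neg (hnz (i + 1))]
    rcases Nat.lt_or_ge (i + 1) (μ + lam) with hlt | hge
    · have hnone : seen.get? (rseq n (i + 1)) = none := by
        cases hopt : seen.get? (rseq n (i + 1)) with
        | none => rfl
        | some j =>
          obtain ⟨jn, _, hle, hv⟩ := inv1 _ _ hopt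
          have hμj : μ ≤ jn := hc.2.2.1 jn (i + 1) (by omega) hv
          have hdv : lam ∣ (i + 1 - jn) := cyc_dvd n hc hμj (by omega) hv
          have := Nat.le_of_dvd (by omega) hdv
          omega
      rw [hnone]
      have hcast : (i : Int) + 1 = ((i + 1 : Nat) : Int) := by push_cast; ring
      rw [hcast]
      apply ih (i + 1) _ hlt (by omega)
      · intro v j hget
        rw [PySem.Dict.get?_insert] at hget
        split at hget
        · rename_i hv
          exact ⟨i + 1, by injection hget with h; rw [← h], le_refl _, by rw [hv]⟩
        · obtain ⟨jn, hj, hle, hv⟩ := inv1 _ _ hget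
          exact ⟨jn, hj, by omega, hv⟩
      · intro j hj
        rcases Nat.lt_or_ge j (i + 1) with hj' | hj'
        · have hne : rseq n j ≠ rseq n (i + 1) := by
            intro he
            have hμj : μ ≤ j := hc.2.2.1 j (i + 1) (by omega) he
            have hdv : lam ∣ (i + 1 - j) := cyc_dvd n hc hμj (by omega) he
            have := Nat.le_of_dvd (by omega) hdv
            omega
          rw [PySem.Dict.get?_insert_of_ne _ _ hne]
          exact inv2 j (by omega)
        · have hj2 : j = i + 1 := by omega
          rw [hj2, PySem.Dict.get?_insert_self]
    · have lampos := hc.1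
      have hi : i + 1 = μ + lam := by omega
      have heq : rseq n (i + 1) = rseq n μ := by rw [hi]; exact hc.2.1
      have hget : seen.get? (rseq n (i + 1)) = some (μ : Int) := by
        rw [heq]; exact inv2 μ (by omega)
      rw [hget]
      have hiv : (i : Int) + 1 = (μ : Int) + (lam : Int) := by omega
      rw [hiv]

lemma loopB_z (n : Int) (hn : 0 < n) {μ lam : Nat} (hc : Cyc n μ lam)
    (hz : rseq n μ = 0) :
    ∀ fuel i (seen : PySem.Dict Int Int),
      i < μ → μ ≤ i + fuel →
      (∀ v j, seen.get? v = some j → ∃ jn : Nat, jn ≤ i ∧ rseq n jn = v) →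
      solveAltLoop n fuel seen (rseq n i) (i : Int) = (0, 0) := by
  intro fuel
  induction fuel with
  | zero => intro i seen h1 h2 _; omega
  | succ fuel ih =>
    intro i seen h1 h2 inv1
    have hm : PySem.Int.mod (rseq n i * 10) n = rseq n (i + 1) := by
      rw [PySem.Int.mod_eq_emod_of_pos hn]; rfl
    rcases Nat.lt_or_ge (i + 1) μ with hlt | hge
    · have hnz1 : rseq n (i + 1) ≠ 0 := rseq_no_zero_before_mu n hc hlt
      have hnone : seen.get? (rseq n (i + 1)) = none := by
        cases hopt : seen.get? (rseq n (i + 1)) with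
        | none => rfl
        | some j =>
          obtain ⟨jn, hle, hv⟩ := inv1 _ _ hopt
          have := hc.2.2.1 jn (i + 1) (by omega) hv
          omega
      simp only [solveAltLoop, hm, if_neg hnz1, hnone]
      have hcast : (i : Int) + 1 = ((i + 1 : Nat) : Int) := by push_cast; ring
      rw [hcast]
      apply ih (i + 1) _ hlt (by omega)
      intro v j hget
      rw [PySem.Dict.get?_insert] at hget
      split at hget
      · rename_i hv
        exact ⟨i + 1, le_refl _, by rw [hv]⟩
      · obtain ⟨jn, hle, hv⟩ := inv1 _ _ hget
        exact ⟨jn, by omega, hv⟩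
    · have hi : i + 1 = μ := by omega
      have h0 : rseq n (i + 1) = 0 := by rw [hi]; exact hz
      simp [solveAltLoop, hm, h0]

-- lookup in the seed dict {1: 0}
lemma get?_seed (v : Int) :
    (PySem.Dict.ofList [((1 : Int), (0 : Int))]).get? v
      = if (1 : Int) = v then some 0 else none := by
  have h : PySem.Dict.ofList [((1 : Int), (0 : Int))] = PySem.Dict.mk [(1, 0)] := by decide
  rw [h, PySem.Dict.get?_mk_cons]
  by_cases hv : (1 : Int) = v
  · simp [hv]
  · have h2 : (PySem.Dict.mk ([] : List (Int × Int))).get? v = none := PySem.Dict.get?_empty v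
    simp [hv, h2]

-- ===== VERDICT (by name: the statement is the Claim_ definition above) =====
theorem solve_spec : Claim_equal_solve := by
  intro n _
  unfold Spec_solve
  by_cases hn : 0 < n
  · obtain ⟨μ, lam, hc, hbound⟩ := cyc_exists n hn
    have lampos := hc.1
    have h1 : lam * (μ / lam) + μ % lam = μ := Nat.div_add_mod μ lam
    have h2 : μ % lam < lam := Nat.mod_lt _ lampos
    have hk0 : 0 < lam * (μ / lam) + lam ∧
        rseq n (lam * (μ / lam) + lam) = rseq n (2 * (lam * (μ / lam) + lam)) := by
      constructor
      · omega
      · refine (cyc_per' n hc (by omega) (by omega) ?_).symm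
        refine ⟨μ / lam + 1, ?_⟩
        have h3 : lam * (μ / lam + 1) = lam * (μ / lam) + lam := by ring
        omega
    obtain ⟨K, ⟨hKpos, hKeq⟩, hKmin'⟩ :=
      exists_least (P := fun k => 0 < k ∧ rseq n k = rseq n (2 * k))
        ⟨lam * (μ / lam) + lam, hk0⟩
    have hKmin : ∀ j, 0 < j → j < K → rseq n j ≠ rseq n (2 * j) :=
      fun j hj1 hj2 he => hKmin' j hj2 ⟨hj1, he⟩
    have hμK : μ ≤ K := hc.2.2.1 K (2 * K) (by omega) hKeq
    have hdvdK : lam ∣ K := by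
      have h := cyc_dvd n hc hμK (show K < 2 * K by omega) hKeq
      rwa [show 2 * K - K = K by omega] at h
    have hKle : K ≤ μ + lam := by
      have hle : K ≤ lam * (μ / lam) + lam := by
        by_contra h
        exact hKmin' (lam * (μ / lam) + lam) (by omega) hk0
      omega
    have e1 : solveLoop1 n (solveFuelA n) 1 1 = (rseq n K, rseq n (2 * K)) := by
      have h := loop1_spec n hn hKeq hKpos hKmin (solveFuelA n) 0 hKpos
        (by unfold solveFuelA; omega)
      simpa [rseq] using h
    have h2K : rseq n (2 * K) = rseq n K :=
      cyc_per' n hc hμK (by omega) (by rwa [show 2 * K - K = K by omega])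
    by_cases hzero : rseq n K = 0
    · have hμ0 : rseq n μ = 0 := rseq_zero_mu n hc hμK hzero
      have hμpos : 0 < μ := by
        rcases Nat.eq_zero_or_pos μ with h | h
        · rw [h] at hμ0; norm_num [rseq] at hμ0
        · exact h
      have hA : solve n = (0, 0) := by
        simp [solve, hn, e1, h2K, hzero]
      have hB : solve_alt n = (0, 0) := by
        unfold solve_alt
        rw [if_neg (by omega : ¬ n ≤ 0)]
        have hinv : ∀ v j, (PySem.Dict.ofList [((1 : Int), (0 : Int))]).get? v = some j →
            ∃ jn : Nat, jn ≤ 0 ∧ rseq n jn = v := by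
          intro v j hget
          rw [get?_seed] at hget
          split at hget
          · rename_i hv
            exact ⟨0, le_refl _, hv⟩
          · exact absurd hget (by simp)
        have h := loopB_z n hn hc hμ0 (n.toNat + 1) 0 (PySem.Dict.ofList [(1, 0)])
          hμpos (by omega) hinv
        simpa [rseq] using h
      rw [hA, hB]
    · have hnz : ∀ k, rseq n k ≠ 0 := by
        intro k hk
        rcases Nat.lt_or_ge k μ with h | h
        · exact rseq_no_zero_before_mu n hc h hk
        · have hμ0 := rseq_zero_mu n hc h hk
          have h3 : rseq n (μ + (K - μ)) = 0 := rseq_zero_prop n hμ0 _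
          rw [show μ + (K - μ) = K by omega] at h3
          exact hzero h3
      have hKμ : rseq n (K + μ) = rseq n μ :=
        cyc_per' n hc (le_refl μ) (by omega)
          (by rw [show K + μ - μ = K by omega]; exact hdvdK)
      have e2 : solveLoop2 n (solveFuelA n) 1 (rseq n K) 1
          = ((μ : Int) + 1, rseq n (K + μ), rseq n μ) := by
        have h := loop2_spec n hn hc hμK hdvdK hKpos (solveFuelA n) 0 (Nat.zero_le μ)
          (by unfold solveFuelA; omega)
        simpa [rseq] using h
      have e3 : solveLoop3 n (solveFuelA n) ((μ : Int) + 1) (rseq n (K + μ))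
          (rseq n μ * 10 % n) = (μ : Int) + (lam : Int) := by
        rw [hKμ]
        have hmod : rseq n μ * 10 % n = rseq n (μ + 0 + 1) := rfl
        rw [hmod]
        have h := loop3_spec n hn hc (solveFuelA n) 0 (by omega)
          (by unfold solveFuelA; omega)
        simpa using h
      have hA : solve n = ((μ : Int) + 1, (μ : Int) + (lam : Int)) := by
        have hp2 : rseq n (2 * K) ≠ 0 := by rw [h2K]; exact hnz K
        simp [solve, hn, e1, hp2, e2, e3]
      have hB : solve_alt n = ((μ : Int) + 1, (μ : Int) + (lam : Int)) := by
        unfold solve_alt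
        rw [if_neg (by omega : ¬ n ≤ 0)]
        have hinv1 : ∀ v j, (PySem.Dict.ofList [((1 : Int), (0 : Int))]).get? v = some j →
            ∃ jn : Nat, j = (jn : Int) ∧ jn ≤ 0 ∧ rseq n jn = v := by
          intro v j hget
          rw [get?_seed] at hget
          split at hget
          · rename_i hv
            exact ⟨0, by injection hget with h'; rw [← h']; rfl, le_refl _, hv⟩
          · exact absurd hget (by simp)
        have hinv2 : ∀ j : Nat, j ≤ 0 →
            (PySem.Dict.ofList [((1 : Int), (0 : Int))]).get? (rseq n j) = some (j : Int) := by
          intro j hj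
          have hj0 : j = 0 := by omega
          rw [hj0, show rseq n 0 = 1 from rfl, get?_seed]
          simp
        have h := loopB_nz n hn hc hnz (n.toNat + 1) 0 (PySem.Dict.ofList [(1, 0)])
          (by omega) (by omega) hinv1 hinv2
        simpa [rseq] using h
      rw [hA, hB]
  · have hA : solve n = (0, 0) := by simp [solve, hn]
    have hB : solve_alt n = (0, 0) := by simp [solve_alt, show n ≤ 0 by omega]
    rw [hA, hB]
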